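-- pv_equiv track=rewrite | github.com/JonathanKosasih18/CTBA_MCP_Prototype | scripts/export_customers_from_sql.py | extract_top_level_tuples
-- ===== SOURCE A (Python) =====
-- def extract_top_level_tuples(s: str):
--     tuples = []
--     i = 0
--     n = len(s)
--     in_str = False
--     start = None
--     depth = 0
--     while i < n:
--         ch = s[i]
--         if ch == "'":
--             if in_str:
--                 # handle escaped single-quote by doubling
--                 if i + 1 < n and s[i + 1] == "'":
--                     i += 2
--                     continue
--                 in_str = False
--                 i += 1
--                 continue
--             else:
--                 in_str = True
--                 i += 1
--                 continue
--
--         if not in_str: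
--             if ch == '(':
--                 if depth == 0:
--                     start = i
--                 depth += 1
--             elif ch == ')':
--                 depth -= 1
--                 if depth == 0 and start is not None:
--                     tuples.append(s[start:i+1])
--                     start = None
--         i += 1
--     return tuples
-- ===== SOURCE B (Python) =====
-- def extract_top_level_tuples(s: str):
--     # pass 1: mask characters that belong to string literals (and quote chars) with spaces
--     chars = list(s)
--     n = len(chars)
--     i = 0
--     in_str = False
--     while i < n:
--         if chars[i] == "'":
--             if in_str and i + 1 < n and chars[i + 1] == "'":
--                 chars[i] = ' '
--                 chars[i + 1] = ' '
--                 i += 2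
--                 continue
--             in_str = not in_str
--             chars[i] = ' '
--         elif in_str:
--             chars[i] = ' '
--         i += 1
--     masked = ''.join(chars)
--     # pass 2: plain depth scan over the masked copy, slicing from the original
--     tuples = []
--     depth = 0
--     start = None
--     for i, ch in enumerate(masked):
--         if ch == '(':
--             if depth == 0:
--                 start = i
--             depth += 1
--         elif ch == ')':
--             depth -= 1
--             if depth == 0 and start is not None:
--                 tuples.append(s[start:i + 1])
--                 start = None
--     return tuples
-- ===== Notes on version B (the rewrite author's own statement) =====
-- stated objective: alternative
-- what changed: A's single scan that interleaves quote/escape state with paren-depth tracking is split into two passes: first mask all string-literal characters (respecting the '' escape) with spaces, then run a plain depth scan over the masked copy, slicing tuples from the original string.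
import Mathlib
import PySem

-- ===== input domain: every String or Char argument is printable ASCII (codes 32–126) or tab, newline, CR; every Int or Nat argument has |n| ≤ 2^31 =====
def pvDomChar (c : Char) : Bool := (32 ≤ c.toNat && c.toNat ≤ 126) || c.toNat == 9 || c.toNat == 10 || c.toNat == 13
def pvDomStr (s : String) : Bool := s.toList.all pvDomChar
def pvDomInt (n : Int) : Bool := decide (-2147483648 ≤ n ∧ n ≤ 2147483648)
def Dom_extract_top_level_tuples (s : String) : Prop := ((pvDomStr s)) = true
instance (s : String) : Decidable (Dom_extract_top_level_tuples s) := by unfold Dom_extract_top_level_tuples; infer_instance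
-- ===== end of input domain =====

-- B replaces A's single interleaved scan by two passes (mask string literals with spaces, then a
-- plain depth scan over the masked copy, slicing from the original); objective: simpler, same cost.

-- ===== PORT A =====
-- A's while-loop: recursion on the remaining suffix, carrying the index i and the loop state
-- (tuples, in_str, start, depth); 'i += 2' consumes two characters of the suffix.
def pvALoop (s : List Char) : List Char → Nat → List String → Bool → Option Nat → Int → List String
  | [], _, tuples, _, _, _ => tuples
  | ch :: rest, i, tuples, in_str, start, depth =>
    if ch = '\'' then
      if in_str then
        match rest with
        | c2 :: rest2 =>
          if c2 = '\'' then pvALoop s rest2 (i + 2) tuples in_str start depth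
          else pvALoop s (c2 :: rest2) (i + 1) tuples false start depth
        | [] => pvALoop s [] (i + 1) tuples false start depth
      else pvALoop s rest (i + 1) tuples true start depth
    else if in_str then
      pvALoop s rest (i + 1) tuples in_str start depth
    else if ch = '(' then
      pvALoop s rest (i + 1) tuples in_str (if depth = 0 then some i else start) (depth + 1)
    else if ch = ')' then
      match start with
      | some st =>
        if depth - 1 = 0 then
          pvALoop s rest (i + 1)
            (tuples ++ [String.ofList (PySem.List.slice s (some (st : Int)) (some ((i : Int) + 1)))])
            in_str none (depth - 1)
        else pvALoop s rest (i + 1) tuples in_str (some st) (depth - 1)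
      | none => pvALoop s rest (i + 1) tuples in_str none (depth - 1)
    else pvALoop s rest (i + 1) tuples in_str start depth
  termination_by rest _ _ _ _ _ => rest.length

def extract_top_level_tuples (s : String) : List String :=
  pvALoop s.toList s.toList 0 [] false none 0

-- ===== PORT B =====
-- pass 1 of B: mask string-literal characters (and quotes) with spaces, respecting the '' escape.
def pvMask : List Char → Bool → List Char
  | [], _ => []
  | c :: rest, in_str =>
    if c = '\'' then
      if in_str then
        match rest with
        | c2 :: rest2 =>
          if c2 = '\'' then ' ' :: ' ' :: pvMask rest2 true
          else ' ' :: pvMask (c2 :: rest2) false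
        | [] => [' ']
      else ' ' :: pvMask rest true
    else if in_str then ' ' :: pvMask rest in_str
    else c :: pvMask rest in_str
  termination_by rest _ => rest.length

-- pass 2 of B: 'for i, ch in enumerate(masked)' with state (tuples, start, depth).
def pvBLoop (s : List Char) : List Char → Nat → List String → Option Nat → Int → List String
  | [], _, tuples, _, _ => tuples
  | ch :: rest, i, tuples, start, depth =>
    if ch = '(' then
      pvBLoop s rest (i + 1) tuples (if depth = 0 then some i else start) (depth + 1)
    else if ch = ')' then
      match start with
      | some st =>
        if depth - 1 = 0 then
          pvBLoop s rest (i + 1)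
            (tuples ++ [String.ofList (PySem.List.slice s (some (st : Int)) (some ((i : Int) + 1)))])
            none (depth - 1)
        else pvBLoop s rest (i + 1) tuples (some st) (depth - 1)
      | none => pvBLoop s rest (i + 1) tuples none (depth - 1)
    else pvBLoop s rest (i + 1) tuples start depth

def extract_top_level_tuples_alt (s : String) : List String :=
  pvBLoop s.toList (pvMask s.toList false) 0 [] none 0

-- ===== PRECONDITION & SPEC =====
def Spec_extract_top_level_tuples (s : String) (out : List String) : Prop := out = extract_top_level_tuples_alt s
instance (s : String) (out : List String) : Decidable (Spec_extract_top_level_tuples s out) := by unfold Spec_extract_top_level_tuples; infer_instance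

-- ===== CLAIM (what is proved, stated in full; the proofs are below) =====
def Claim_equal_extract_top_level_tuples : Prop := ∀ (s : String), Dom_extract_top_level_tuples s → Spec_extract_top_level_tuples s (extract_top_level_tuples s)

-- ===== LEMMAS AND PROOFS =====

-- step equations for pvMask (its auto-generated equations are awkward for simp)
theorem pvMask_nil (b : Bool) : pvMask [] b = [] := by rw [pvMask.eq_def]
theorem pvMask_quote_false (rest : List Char) : pvMask ('\'' :: rest) false = ' ' :: pvMask rest true := by
  rw [pvMask.eq_def]; simp
theorem pvMask_quote_true_nil : pvMask ['\''] true = [' '] := by rw [pvMask.eq_def]; simp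
theorem pvMask_quote_quote (rest : List Char) : pvMask ('\'' :: '\'' :: rest) true = ' ' :: ' ' :: pvMask rest true := by
  rw [pvMask.eq_def]; simp
theorem pvMask_quote_other (c2 : Char) (rest : List Char) (h2 : c2 ≠ '\'') :
    pvMask ('\'' :: c2 :: rest) true = ' ' :: pvMask (c2 :: rest) false := by
  rw [pvMask.eq_def]; simp [h2]
theorem pvMask_in_str (ch : Char) (rest : List Char) (hq : ch ≠ '\'') :
    pvMask (ch :: rest) true = ' ' :: pvMask rest true := by
  rw [pvMask.eq_def]; simp [hq]
theorem pvMask_out_str (ch : Char) (rest : List Char) (hq : ch ≠ '\'') :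
    pvMask (ch :: rest) false = ch :: pvMask rest false := by
  rw [pvMask.eq_def]; simp [hq]

theorem pvALoop_eq_pvBLoop (s : List Char) :
    ∀ (m : Nat) (rest : List Char), rest.length ≤ m →
    ∀ (i : Nat) (tuples : List String) (in_str : Bool) (start : Option Nat) (depth : Int),
      pvALoop s rest i tuples in_str start depth =
        pvBLoop s (pvMask rest in_str) i tuples start depth := by
  intro m
  induction m with
  | zero =>
    intro rest h
    have h0 : rest = [] := List.eq_nil_of_length_eq_zero (Nat.le_zero.mp h)
    subst h0
    intro i tuples in_str start depth
    simp [pvALoop, pvMask_nil, pvBLoop]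
  | succ m ih =>
    intro rest h i tuples in_str start depth
    cases rest with
    | nil => simp [pvALoop, pvMask_nil, pvBLoop]
    | cons ch rest =>
      have hr : rest.length ≤ m := by simpa using h
      rw [pvALoop.eq_def]
      by_cases hq : ch = '\''
      · subst hq
        cases in_str with
        | false =>
          simp only [Bool.false_eq_true, if_false]
          rw [ih rest hr]
          simp [pvBLoop, pvMask_quote_false]
        | true =>
          cases rest with
          | nil =>
            simp only []
            rw [ih [] (Nat.zero_le m)]
            simp [pvBLoop, pvMask_quote_true_nil, pvMask_nil]
          | cons c2 rest2 =>
            by_cases h2 : c2 = '\''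
            · subst h2
              simp only []
              rw [ih rest2 (by simp at hr ⊢; omega)]
              simp [pvBLoop, pvMask_quote_quote]
            · simp only [if_neg h2]
              rw [ih (c2 :: rest2) hr]
              simp [pvBLoop, pvMask_quote_other c2 rest2 h2]
      · cases in_str with
        | true =>
          simp only [if_neg hq]
          rw [ih rest hr]
          simp [pvBLoop, pvMask_in_str ch rest hq]
        | false =>
          by_cases hp : ch = '('
          · subst hp
            simp only [if_neg hq, Bool.false_eq_true, if_false]
            rw [ih rest hr]
            simp [pvBLoop, pvMask_out_str '(' rest (by decide)]
          · by_cases hc : ch = ')'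
            · subst hc
              simp only [if_neg hq, Bool.false_eq_true, if_false, if_neg hp]
              cases start with
              | some st =>
                by_cases hd : depth - 1 = 0
                · simp only [if_pos hd]
                  rw [ih rest hr]
                  simp [pvBLoop, pvMask_out_str ')' rest (by decide), hd]
                · simp only [if_neg hd]
                  rw [ih rest hr]
                  simp [pvBLoop, pvMask_out_str ')' rest (by decide), hd]
              | none =>
                rw [ih rest hr]
                simp [pvBLoop, pvMask_out_str ')' rest (by decide)]
            · simp only [if_neg hq, Bool.false_eq_true, if_false, if_neg hp, if_neg hc]
              rw [ih rest hr]
              simp [pvBLoop, pvMask_out_str ch rest hq, hp, hc]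

-- ===== VERDICT (by name: the statement is the Claim_ definition above) =====
theorem extract_top_level_tuples_spec : Claim_equal_extract_top_level_tuples := by
  intro s _
  unfold Spec_extract_top_level_tuples extract_top_level_tuples extract_top_level_tuples_alt
  exact pvALoop_eq_pvBLoop s.toList s.toList.length s.toList (le_refl _) 0 [] false none 0
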